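-- pv_equiv track=rewrite | github.com/andrewdcampbell/Miscellaneous | smallest_subseq.py | iterativeSSK
-- ===== SOURCE A (Python) =====
-- def iterativeSSK(s, k):
--     """
--     Run-time: O(n) (assuming list slicing and concatenation is constant time).
--     """
--     n = len(s) - k
--     pos = 0
--     while n > 0 and pos < len(s) - 1:
--         if(s[pos] > s[pos+1]):
--             s = s[:pos]+s[pos+1:]
--             n = n - 1
--             if pos > 0:
--                 pos = pos - 1
--         else:
--             pos = pos + 1
--     if n > 0:
--         s = s[:len(s)-n]
--     return s
-- ===== SOURCE B (Python) =====
-- def iterativeSSK(s, k):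
--     r = len(s) - k  # number of characters to remove; k is the target length
--     stack = []
--     for c in s:
--         while r > 0 and stack and stack[-1] > c:
--             stack.pop()
--             r -= 1
--         stack.append(c)
--     if r > 0:
--         stack = stack[:len(stack)-r]
--     return ''.join(stack)
-- ===== Notes on version B (the rewrite author's own statement) =====
-- stated objective: faster
-- what changed: Replaced A's repeated delete-and-backtrack scan over the string (each removal rebuilds the string by slicing and steps the cursor back) with a single left-to-right pass over the characters maintaining a monotonic stack, popping larger stack tops while removals remain and trimming the leftover removals from the end.
import Mathlib
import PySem

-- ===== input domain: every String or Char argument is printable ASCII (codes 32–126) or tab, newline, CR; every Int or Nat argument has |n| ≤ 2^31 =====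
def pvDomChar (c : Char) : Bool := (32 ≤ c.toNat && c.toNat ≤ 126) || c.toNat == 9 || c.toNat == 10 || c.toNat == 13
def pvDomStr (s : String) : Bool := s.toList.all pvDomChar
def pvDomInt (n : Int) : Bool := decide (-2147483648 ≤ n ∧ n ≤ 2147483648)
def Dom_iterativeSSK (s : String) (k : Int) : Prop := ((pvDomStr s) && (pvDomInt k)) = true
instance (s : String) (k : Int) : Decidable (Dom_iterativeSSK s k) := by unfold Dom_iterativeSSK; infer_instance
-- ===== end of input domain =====

-- B replaces A's quadratic delete-and-backtrack scan with a one-pass monotonic stack (objective: faster, asymptotic).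

-- ===== PORT A =====
-- A's while loop: state (s, n, pos); on s[pos] > s[pos+1] delete s[pos] (slice concat), n -= 1,
-- step pos back (not below 0); otherwise pos += 1.  pos - 1 is Nat subtraction, matching
-- Python's 'if pos > 0: pos = pos - 1'.
-- structural recursion on a fuel bound (2*len(s) steps always suffice: each iteration
-- either deletes a character or advances pos); the fuel is a totality guard only.
def iterativeSSK_loop : Nat → List Char → Int → Nat → List Char × Int
  | 0, s, n, _ => (s, n)
  | fuel + 1, s, n, pos =>
    if h : 0 < n ∧ pos + 1 < s.length then
      if (s[pos+1]'h.2) < (s[pos]'(by omega)) then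
        iterativeSSK_loop fuel (s.take pos ++ s.drop (pos+1)) (n - 1) (pos - 1)
      else
        iterativeSSK_loop fuel s n (pos + 1)
    else (s, n)

def iterativeSSK (s : String) (k : Int) : String :=
  let cs := s.toList
  let n : Int := (cs.length : Int) - k
  let r := iterativeSSK_loop (2 * cs.length) cs n 0
  -- final trim s = s[:len(s)-n]: exact Python slice (negative stop counts from the end)
  if 0 < r.2 then String.ofList (PySem.List.slice r.1 none (some ((r.1.length : Int) - r.2)))
  else String.ofList r.1

-- ===== PORT B =====
-- B's stack is kept top-first (a Lean list consed at the head stands for Python's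
-- list appended/popped at the end); it is reversed back before the final trim/join.
-- bPop is Source B's inner 'while r > 0 and stack and stack[-1] > c' loop.
def bPop (c : Char) : List Char → Int → List Char × Int
  | t :: rest, r => if 0 < r ∧ c < t then bPop c rest (r - 1) else (t :: rest, r)
  | [], r => ([], r)

def bStep (p : List Char × Int) (c : Char) : List Char × Int :=
  let q := bPop c p.1 p.2
  (c :: q.1, q.2)

def iterativeSSK_alt (s : String) (k : Int) : String :=
  let cs := s.toList
  let r0 : Int := (cs.length : Int) - k
  let p := cs.foldl bStep ([], r0)
  let stack := p.1.reverse
  -- stack[:len(stack)-r]: exact Python slice (negative stop counts from the end)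
  if 0 < p.2 then String.ofList (PySem.List.slice stack none (some ((stack.length : Int) - p.2)))
  else String.ofList stack

-- ===== PRECONDITION & SPEC =====
def Spec_iterativeSSK (s : String) (k : Int) (out : String) : Prop := out = iterativeSSK_alt s k
instance (s : String) (k : Int) (out : String) : Decidable (Spec_iterativeSSK s k out) := by unfold Spec_iterativeSSK; infer_instance

-- ===== CLAIM (what is proved, stated in full; the proofs are below) =====
def Claim_equal_iterativeSSK : Prop := ∀ (s : String) (k : Int), Dom_iterativeSSK s k → Spec_iterativeSSK s k (iterativeSSK s k)

-- ===== LEMMAS AND PROOFS =====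

-- With no removals left (r ≤ 0) the fold only pushes.
lemma foldl_bStep_nonpos (l : List Char) (st : List Char) (r : Int) (hr : r ≤ 0) :
    l.foldl bStep (st, r) = (l.reverse ++ st, r) := by
  induction l generalizing st with
  | nil => simp
  | cons c t ih =>
      have hstep : bStep (st, r) c = (c :: st, r) := by
        cases st with
        | nil => simp [bStep, bPop]
        | cons a b =>
            have : ¬ (0 < r ∧ c < a) := fun hc => absurd hc.1 (by omega)
            simp [bStep, bPop, this]
      simp [List.foldl_cons, hstep, ih]

lemma bStep_pop (c t : Char) (st : List Char) (r : Int) (h0 : 0 < r) (hlt : c < t) :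
    bStep (t :: st, r) c = bStep (st, r - 1) c := by
  simp [bStep, bPop, h0, hlt]

lemma bStep_push (c t : Char) (st : List Char) (r : Int) (h : ¬ c < t) :
    bStep (t :: st, r) c = (c :: t :: st, r) := by
  simp [bStep, bPop, h]

lemma take_len_append (l1 l2 : List Char) (m : Nat) (h : l1.length = m) :
    (l1 ++ l2).take m = l1 := by subst h; simp

lemma drop_len_append (l1 l2 : List Char) (m : Nat) (h : l1.length = m) :
    (l1 ++ l2).drop m = l2 := by subst h; simp

-- Main invariant: A's loop from (s, n, pos) computes exactly B's fold over the
-- unread suffix started from the read prefix as stack (top-first) with budget n.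
lemma key : ∀ (fuel : Nat) (s : List Char) (n : Int) (pos : Nat), 2 * s.length ≤ fuel + pos →
    (s.drop (pos+1)).foldl bStep ((s.take (pos+1)).reverse, n) =
      ((iterativeSSK_loop fuel s n pos).1.reverse, (iterativeSSK_loop fuel s n pos).2) := by
  intro fuel
  induction fuel with
  | zero =>
      intro s n pos hf
      rw [List.drop_eq_nil_of_le (by omega), List.take_of_length_le (by omega), List.foldl_nil]
      rfl
  | succ fuel ihf =>
      intro s n pos hf
      rw [iterativeSSK_loop]
      split
      · rename_i h
        split
        · rename_i hlt
          have ih := ihf (s.take pos ++ s.drop (pos+1)) (n-1) (pos-1)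
            (by simp only [List.length_append, List.length_take, List.length_drop]; omega)
          cases pos with
          | zero =>
              rcases s with _ | ⟨a, _ | ⟨b, t⟩⟩
              · exact absurd h.2 (by simp)
              · exact absurd h.2 (by simp)
              · have hab : b < a := hlt
                have hstep : bStep ([a], n) b = ([b], n - 1) := by
                  simp [bStep, bPop, h.1, hab]
                simp only [List.take_succ_cons, List.take_zero, List.drop_succ_cons,
                  List.drop_zero, List.nil_append, List.reverse_cons, List.reverse_nil,
                  List.foldl_cons, hstep] at ih ⊢
                simpa using ih
          | succ p =>
              have hp2 : p+1+1 < s.length := h.2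
              have hp1 : p+1 < s.length := by omega
              have hd : s.drop (p+1+1) = s[p+1+1] :: s.drop (p+1+1+1) := List.drop_eq_getElem_cons hp2
              have ht : s.take (p+1+1) = s.take (p+1) ++ [s[p+1]] := by
                rw [List.take_add_one]; simp [List.getElem?_eq_getElem hp1]
              have hlen : (s.take (p+1)).length = p+1 := by
                rw [List.length_take]; omega
              have hts : (s.take (p+1) ++ s.drop (p+1+1)).take (p+1) = s.take (p+1) :=
                take_len_append _ _ _ hlen
              have hds : (s.take (p+1) ++ s.drop (p+1+1)).drop (p+1) = s.drop (p+1+1) :=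
                drop_len_append _ _ _ hlen
              rw [hd, List.foldl_cons, ht, List.reverse_append, List.reverse_singleton,
                  List.singleton_append, bStep_pop _ _ _ _ h.1 hlt]
              have heq := ih
              simp only [Nat.add_sub_cancel] at heq
              rw [hts, hds, hd, List.foldl_cons] at heq
              exact heq
        · rename_i hlt
          have ih := ihf s n (pos+1) (by omega)
          have hp1 : pos < s.length := by omega
          have hd : s.drop (pos+1) = s[pos+1] :: s.drop (pos+1+1) := List.drop_eq_getElem_cons h.2
          have ht : s.take (pos+1) = s.take pos ++ [s[pos]] := by
            rw [List.take_add_one]; simp [List.getElem?_eq_getElem hp1]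
          have ht2 : s.take (pos+1+1) = s.take (pos+1) ++ [s[pos+1]] := by
            rw [List.take_add_one]; simp [List.getElem?_eq_getElem h.2]
          rw [hd, List.foldl_cons, ht, List.reverse_append, List.reverse_singleton,
              List.singleton_append, bStep_push _ _ _ _ hlt]
          have hst : (s[pos+1] :: s[pos] :: (s.take pos).reverse) = (s.take (pos+1+1)).reverse := by
            rw [ht2, ht, List.reverse_append, List.reverse_append]
            simp
          rw [hst]
          exact ih
      · rename_i h
        by_cases hp : pos + 1 < s.length
        · have hn : n ≤ 0 := by
            by_contra hc; exact h ⟨by omega, hp⟩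
          rw [foldl_bStep_nonpos _ _ _ hn, ← List.reverse_append, List.take_append_drop]
        · have hd : s.drop (pos+1) = [] := List.drop_eq_nil_of_le (by omega)
          have ht : s.take (pos+1) = s := List.take_of_length_le (by omega)
          rw [hd, ht, List.foldl_nil]

-- Starting B's fold from the empty stack equals running A's loop from pos = 0.
lemma fold_start (cs : List Char) (n : Int) :
    cs.foldl bStep ([], n)
      = ((iterativeSSK_loop (2 * cs.length) cs n 0).1.reverse,
         (iterativeSSK_loop (2 * cs.length) cs n 0).2) := by
  cases cs with
  | nil => simp [iterativeSSK_loop]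
  | cons a t =>
      have h0 : bStep ([], n) a = ([a], n) := by simp [bStep, bPop]
      have hk := key (2 * (a :: t).length) (a :: t) n 0 (by omega)
      simpa [h0] using hk

theorem iterativeSSK_spec : Claim_equal_iterativeSSK := by
  intro s k _
  show iterativeSSK s k = iterativeSSK_alt s k
  unfold iterativeSSK iterativeSSK_alt
  simp only [fold_start, List.reverse_reverse]
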